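-- pv_equiv track=rewrite | github.com/wheejoo/Programmers_code_study | 03 탐색/Lv3_예산.py | solution
-- ===== SOURCE A (Python) =====
-- def solution(budgets, M):
--     low = 1
--     high = max(budgets)
--
--     while low <= high:
--         mid = (low + high) // 2
--         total = sum([min(mid, budget) for budget in budgets])
--
--         if M >= total:
--             low = mid + 1
--         else:
--             high = mid - 1
--     return low - 1
-- ===== SOURCE B (Python) =====
-- def solution(budgets, M):
--     # Sort once, then sweep the sorted list with a running prefix sum:
--     # inside the first segment where capping overshoots M, the cap is a direct
--     # floor division -- O(n log n) instead of A's binary search over the cap.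
--     bs = sorted(budgets)
--     hi = bs[-1]
--     pre = 0
--     for i, b in enumerate(bs):
--         k = len(bs) - i          # elements still capped at >= b
--         if pre + b * k > M:
--             cap = (M - pre) // k
--             return max(min(cap, hi), 0)
--         pre += b
--     return max(hi, 0)
-- ===== Notes on version B (the rewrite author's own statement) =====
-- stated objective: faster
-- what changed: Replaced the binary search over the cap (each step summing min(cap,b) over the whole list) by a single sort-and-sweep with a running prefix sum that computes the cap in closed form by one floor division inside the overshooting segment.
import Mathlib
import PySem

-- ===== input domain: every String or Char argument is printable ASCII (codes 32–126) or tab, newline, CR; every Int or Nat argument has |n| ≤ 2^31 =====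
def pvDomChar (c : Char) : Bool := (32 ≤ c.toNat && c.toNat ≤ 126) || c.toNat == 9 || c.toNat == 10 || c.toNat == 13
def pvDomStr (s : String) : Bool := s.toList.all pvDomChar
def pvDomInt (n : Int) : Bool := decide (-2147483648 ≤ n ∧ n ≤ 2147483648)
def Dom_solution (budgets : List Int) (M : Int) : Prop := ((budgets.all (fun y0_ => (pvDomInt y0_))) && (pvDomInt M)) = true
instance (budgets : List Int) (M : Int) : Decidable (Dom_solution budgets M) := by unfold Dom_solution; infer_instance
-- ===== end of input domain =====

-- B replaces A's binary search over the cap by sort + prefix-sum sweep with a closed-form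
-- floor division for the cap (objective: faster).

-- ===== PORT A =====
-- the while-loop of A, state (low, high); terminates because high + 1 - low shrinks
def solGo (budgets : List Int) (M low high : Int) : Int :=
  if h : low ≤ high then
    let mid := PySem.Int.floordiv (low + high) 2
    let total := (budgets.map (fun budget => min mid budget)).sum
    if M ≥ total then solGo budgets M (mid + 1) high
    else solGo budgets M low (mid - 1)
  else low - 1
termination_by (high + 1 - low).toNat
decreasing_by
  · have hb := PySem.Int.floordiv_two_mid_bounds h
    omega
  · have hb := PySem.Int.floordiv_two_mid_bounds h
    omega

def solution (budgets : List Int) (M : Int) : Int :=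
  -- max(budgets) raises on []; Pre_ excludes it, .getD 0 is an unreachable dummy there
  solGo budgets M 1 ((PySem.List.max? budgets (fun x => x)).getD 0)

-- ===== PORT B =====
-- B's for-loop over enumerate(bs): recursion on the remaining suffix t, carrying pre;
-- k = n - i is exactly the length of the remaining suffix
def scanGo (M hi : Int) (t : List Int) (pre : Int) : Int :=
  match t with
  | [] => max hi 0
  | b :: rest =>
    let k : Int := (b :: rest).length
    if pre + b * k > M then max (min (PySem.Int.floordiv (M - pre) k) hi) 0
    else scanGo M hi rest (pre + b)

def solution_alt (budgets : List Int) (M : Int) : Int :=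
  let bs := PySem.List.sorted budgets (fun x => x) false
  let hi := PySem.List.pyGetD bs (-1) 0   -- bs[-1]; raises on [], excluded by Pre_
  scanGo M hi bs 0

-- ===== PRECONDITION & SPEC =====
-- Pre_ excludes only the empty list, on which both A (max([])) and B (bs[-1]) raise.
def Pre_solution (budgets : List Int) (M : Int) : Prop := budgets ≠ []
instance (budgets : List Int) (M : Int) : Decidable (Pre_solution budgets M) := by unfold Pre_solution; infer_instance
def pvWitness_solution : List Int × Int := ([5, 3, 7], 9)

def Spec_solution (budgets : List Int) (M : Int) (out : Int) : Prop := out = solution_alt budgets M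
instance (budgets : List Int) (M : Int) (out : Int) : Decidable (Spec_solution budgets M out) := by unfold Spec_solution; infer_instance

-- ===== CLAIM (what is proved, stated in full; the proofs are below) =====
def Claim_equal_solution : Prop := ∀ (budgets : List Int) (M : Int), Dom_solution budgets M → Pre_solution budgets M → Spec_solution budgets M (solution budgets M)

-- ===== LEMMAS AND PROOFS =====

-- F bs c = sum(min(c, b) for b in bs), the quantity A's loop tests against M
def F (bs : List Int) (c : Int) : Int := (bs.map (fun b => min c b)).sum

lemma F_mono (bs : List Int) {c d : Int} (h : c ≤ d) : F bs c ≤ F bs d := by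
  induction bs with
  | nil => simp [F]
  | cons x xs ih =>
    simp only [F, List.map_cons, List.sum_cons] at *
    have : min c x ≤ min d x := by omega
    omega

lemma F_perm {bs bs' : List Int} (h : bs.Perm bs') (c : Int) : F bs c = F bs' c :=
  List.Perm.sum_eq (h.map _)

lemma F_prefix (p t : List Int) (c : Int) (hp : ∀ x ∈ p, x ≤ c) :
    F (p ++ t) c = p.sum + F t c := by
  induction p with
  | nil => simp [F]
  | cons x xs ih =>
    have hx : min c x = x := min_eq_right (hp x (by simp))
    simp only [List.cons_append, F, List.map_cons, List.sum_cons] at *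
    rw [hx, ih (fun y hy => hp y (by simp [hy]))]
    ring

lemma F_const (t : List Int) (c : Int) (ht : ∀ x ∈ t, c ≤ x) : F t c = c * t.length := by
  induction t with
  | nil => simp [F]
  | cons x xs ih =>
    have hx : min c x = c := min_eq_left (ht x (by simp))
    simp only [F, List.map_cons, List.sum_cons, List.length_cons] at *
    rw [hx, ih (fun y hy => ht y (by simp [hy]))]
    push_cast
    ring

lemma scanGo_spec (M hi : Int) :
    ∀ (t p : List Int),
      (p ++ t).Pairwise (· ≤ ·) →
      (∀ x ∈ p ++ t, x ≤ hi) → hi ∈ p ++ t →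
      (∀ x ∈ p, p.sum + x * t.length ≤ M) →
      0 ≤ scanGo M hi t p.sum ∧
      (hi ≤ 0 → scanGo M hi t p.sum = 0) ∧
      (1 ≤ hi → scanGo M hi t p.sum ≤ hi) ∧
      (1 ≤ scanGo M hi t p.sum → F (p ++ t) (scanGo M hi t p.sum) ≤ M) ∧
      (scanGo M hi t p.sum < hi → M < F (p ++ t) (scanGo M hi t p.sum + 1)) := by
  intro t
  induction t with
  | nil =>
    intro p hpw hle hmem hinv
    simp only [List.append_nil] at hle hmem ⊢
    simp only [scanGo]
    have hsum : p.sum ≤ M := by have := hinv hi hmem; simpa using this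
    refine ⟨by omega, by omega, by omega, ?_, by omega⟩
    intro hr1
    have hmax : max hi 0 = hi := by omega
    rw [hmax]
    have hFp : F p hi = p.sum + F [] hi := by
      have := F_prefix p [] hi hle
      simpa using this
    simp only [F, List.map_nil, List.sum_nil] at hFp
    simp only [F] at hFp ⊢
    omega
  | cons b rest ih =>
    intro p hpw hle hmem hinv
    have hk0 : (0:Int) < ((b :: rest).length : Int) := by
      simp only [List.length_cons]; push_cast; omega
    have hbrest : ∀ y ∈ rest, b ≤ y := by
      have := (List.pairwise_append.mp hpw).2.1
      exact fun y hy => (List.pairwise_cons.mp this).1 y hy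
    have hpb : ∀ x ∈ p, x ≤ b := by
      have := (List.pairwise_append.mp hpw).2.2
      exact fun x hx => this x hx b (by simp)
    have hbhi : b ≤ hi := hle b (by simp)
    simp only [scanGo]
    by_cases hfire : p.sum + b * ((b :: rest).length : Int) > M
    · rw [if_pos hfire]
      set k : Int := ((b :: rest).length : Int) with hkdef
      set cap : Int := PySem.Int.floordiv (M - p.sum) k with hcapdef
      have hcap1 : cap * k ≤ M - p.sum :=
        (PySem.Int.le_floordiv_iff_mul_le hk0).mp le_rfl
      have hcap2 : M - p.sum < (cap + 1) * k :=
        (PySem.Int.floordiv_lt_iff_lt_mul hk0).mp (by omega)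
      have hcapb : cap < b := by
        have hmul : cap * k < b * k := by omega
        exact lt_of_mul_lt_mul_right hmul (by omega)
      have hpcap : ∀ x ∈ p, x ≤ cap := by
        intro x hx
        have hxk : x * k ≤ M - p.sum := by
          have := hinv x hx
          simp only [hkdef, List.length_cons] at *
          push_cast at *
          nlinarith
        exact (PySem.Int.le_floordiv_iff_mul_le hk0).mpr hxk
      have hmincap : min cap hi = cap := min_eq_left (by omega)
      rw [hmincap]
      have hF : ∀ c : Int, (∀ x ∈ p, x ≤ c) → c ≤ b →
          F (p ++ b :: rest) c = p.sum + c * k := by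
        intro c h1 h2
        rw [F_prefix p (b :: rest) c h1,
            F_const (b :: rest) c (by
              intro y hy
              rcases List.mem_cons.mp hy with rfl | hy
              · exact h2
              · exact le_trans h2 (hbrest y hy))]
      refine ⟨by omega, by omega, by omega, ?_, ?_⟩
      · intro hr1
        have hr : max cap 0 = cap := by omega
        rw [hr] at hr1 ⊢
        rw [hF cap hpcap (le_of_lt hcapb)]
        omega
      · intro hlt
        have hFc1 : F (p ++ b :: rest) (cap + 1) = p.sum + (cap + 1) * k :=
          hF (cap + 1) (fun x hx => le_trans (hpcap x hx) (by omega)) (by omega)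
        by_cases hc0 : 0 ≤ cap
        · have hr : max cap 0 = cap := by omega
          rw [hr]
          omega
        · have hr : max cap 0 = 0 := by omega
          rw [hr]
          have hmono : F (p ++ b :: rest) (cap + 1) ≤ F (p ++ b :: rest) (0 + 1) :=
            F_mono _ (by omega)
          omega
    · rw [if_neg hfire]
      have hbk : b * ((b :: rest).length : Int) = b + b * (rest.length : Int) := by
        simp only [List.length_cons]; push_cast; ring
      have hsum' : p.sum + b = (p ++ [b]).sum := by simp
      have hassoc : (p ++ [b]) ++ rest = p ++ b :: rest := by simp
      have hinv' : ∀ x ∈ p ++ [b], (p ++ [b]).sum + x * (rest.length : Int) ≤ M := by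
        intro x hx
        have hxb : x ≤ b := by
          rcases List.mem_append.mp hx with hx | hx
          · exact hpb x hx
          · simp at hx; omega
        have hmul : x * (rest.length : Int) ≤ b * (rest.length : Int) :=
          mul_le_mul_of_nonneg_right hxb (by positivity)
        rw [← hsum']
        omega
      have := ih (p ++ [b]) (by rw [hassoc]; exact hpw) (by rw [hassoc]; exact hle)
        (by rw [hassoc]; exact hmem) hinv'
      rw [hassoc] at this
      rw [hsum']
      exact this

lemma solGo_eq (bs : List Int) (M hi r : Int)
    (hC2 : 1 ≤ r → F bs r ≤ M)
    (hC3 : r < hi → M < F bs (r + 1)) :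
    ∀ (n : Nat) (low high : Int), (high + 1 - low).toNat = n →
      1 ≤ low → low - 1 ≤ r → r ≤ high → high ≤ hi →
      solGo bs M low high = r := by
  intro n
  induction n using Nat.strong_induction_on with
  | _ n ih =>
    intro low high hn h1 hlr hrh hhhi
    rw [solGo]
    by_cases h : low ≤ high
    · have hb := PySem.Int.floordiv_two_mid_bounds h
      set mid := PySem.Int.floordiv (low + high) 2 with hmid
      simp only [dif_pos h]
      by_cases htot : M ≥ (bs.map (fun budget => min mid budget)).sum
      · rw [if_pos htot]
        have hmr : mid ≤ r := by
          by_contra hc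
          push Not at hc
          have h1' : M < F bs (r + 1) := hC3 (by omega)
          have h2' : F bs (r + 1) ≤ F bs mid := F_mono bs (by omega)
          exact absurd htot (by simp only [ge_iff_le, not_le]; calc M < F bs (r+1) := h1'
                                                                   _ ≤ F bs mid := h2')
        exact ih (high + 1 - (mid + 1)).toNat (by omega) (mid + 1) high rfl
          (by omega) (by omega) (by omega) (by omega)
      · rw [if_neg htot]
        have hrm : r ≤ mid - 1 := by
          by_contra hc
          push Not at hc
          have h1' : F bs r ≤ M := hC2 (by omega)
          have h2' : F bs mid ≤ F bs r := F_mono bs (by omega)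
          exact htot (le_trans h2' h1')
        exact ih (mid - 1 + 1 - low).toNat (by omega) low (mid - 1) rfl
          (by omega) (by omega) (by omega) (by omega)
    · simp only [dif_neg h]
      omega

lemma pairwise_le_getLast : ∀ (l : List Int) (h : l ≠ []), l.Pairwise (· ≤ ·) → ∀ x ∈ l, x ≤ l.getLast h := by
  intro l
  induction l with
  | nil => intro h; exact absurd rfl h
  | cons a t ih =>
    intro h hs x hx
    rcases List.mem_cons.mp hx with rfl | hx
    · cases t with
      | nil => simp
      | cons b t' =>
        rw [List.getLast_cons (by simp)]
        exact (List.pairwise_cons.mp hs).1 _ (List.getLast_mem (by simp))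
    · have ht : t ≠ [] := by intro h'; subst h'; simp at hx
      rw [List.getLast_cons ht]
      exact ih ht (List.pairwise_cons.mp hs).2 x hx

-- ===== VERDICT (by name: the statement is the Claim_ definition above) =====
theorem solution_spec : Claim_equal_solution := by
  intro budgets M _hdom hpre
  unfold Pre_solution at hpre
  unfold Spec_solution
  set bs := PySem.List.sorted budgets (fun x => x) false with hbsdef
  have hperm : bs.Perm budgets := PySem.List.sorted_perm budgets (fun x => x) false
  have hbsne : bs ≠ [] := by
    intro h
    apply hpre
    have hp2 := hperm
    rw [h] at hp2
    exact List.Perm.eq_nil hp2.symm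
  have hpw : bs.Pairwise (· ≤ ·) := by
    have := PySem.List.sorted_pairwise budgets (fun x => x)
    simpa using this
  set hi := PySem.List.pyGetD bs (-1) (0:Int) with hhidef
  have hlast : hi = bs.getLast hbsne := PySem.List.pyGetD_neg_one bs 0 hbsne
  have hhimem : hi ∈ bs := by rw [hlast]; exact List.getLast_mem hbsne
  have hhimax : ∀ x ∈ bs, x ≤ hi := by
    intro x hx
    rw [hlast]
    exact pairwise_le_getLast bs hbsne hpw x hx
  -- A's max(budgets) equals hi
  obtain ⟨m, hm⟩ : ∃ m, PySem.List.max? budgets (fun x => x) = some m := by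
    rcases hmz : PySem.List.max? budgets (fun x => x) with _ | m
    · exact absurd ((PySem.List.max?_eq_none_iff budgets (fun x => x)).mp hmz) hpre
    · exact ⟨m, rfl⟩
  have hmhi : m = hi := by
    have h1 : m ≤ hi := hhimax m (hperm.mem_iff.mpr (PySem.List.max?_mem hm))
    have h2 : hi ≤ m := PySem.List.max?_isMax hm hi (hperm.mem_iff.mp hhimem)
    omega
  -- B's value and its characterisation
  have hscan := scanGo_spec M hi bs []
    (by simpa using hpw) (by simpa using hhimax) (by simpa using hhimem) (by simp)
  simp only [List.sum_nil, List.nil_append] at hscan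
  obtain ⟨h0, hzero, hlehi, hC2, hC3⟩ := hscan
  have hB : solution_alt budgets M = scanGo M hi bs 0 := rfl
  have hA : solution budgets M = solGo budgets M 1 hi := by
    simp only [solution, hm, Option.getD_some, hmhi]
  rw [hA, hB]
  have hFeq : ∀ c, F bs c = F budgets c := fun c => F_perm hperm c
  by_cases hhi1 : 1 ≤ hi
  · exact solGo_eq budgets M hi (scanGo M hi bs 0)
      (fun h => by rw [← hFeq]; exact hC2 h)
      (fun h => by rw [← hFeq]; exact hC3 h)
      (hi + 1 - 1).toNat 1 hi rfl (by omega) (by omega) (hlehi hhi1) le_rfl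
  · rw [solGo]
    rw [dif_neg (by omega)]
    rw [hzero (by omega)]
    norm_num
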